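-- pv_equiv track=rewrite | github.com/O-of/AdventOfCode2020 | Solutions/Day19.py | create_permutations
-- ===== SOURCE A (Python) =====
-- def create_permutations(l):
--     if len(l) == 1:
--         return l[0]
--     else:
--         perms = []
--         for a in l[0]:
--             for b in create_permutations(l[1:]):
--                 perms.append(a+b)
--         return perms
-- ===== SOURCE B (Python) =====
-- def create_permutations(l):
--     # Right-to-left fold: each level's result is built once, no recomputation.
--     acc = l[-1]
--     for level in reversed(l[:-1]):
--         acc = [a + b for a in level for b in acc]
--     return acc
-- ===== Notes on version B (the rewrite author's own statement) =====
-- stated objective: alternative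
-- what changed: Replaced the recursion that recomputes create_permutations(l[1:]) once per element of l[0] with a single right-to-left fold that builds each level's result exactly once.
import Mathlib
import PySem

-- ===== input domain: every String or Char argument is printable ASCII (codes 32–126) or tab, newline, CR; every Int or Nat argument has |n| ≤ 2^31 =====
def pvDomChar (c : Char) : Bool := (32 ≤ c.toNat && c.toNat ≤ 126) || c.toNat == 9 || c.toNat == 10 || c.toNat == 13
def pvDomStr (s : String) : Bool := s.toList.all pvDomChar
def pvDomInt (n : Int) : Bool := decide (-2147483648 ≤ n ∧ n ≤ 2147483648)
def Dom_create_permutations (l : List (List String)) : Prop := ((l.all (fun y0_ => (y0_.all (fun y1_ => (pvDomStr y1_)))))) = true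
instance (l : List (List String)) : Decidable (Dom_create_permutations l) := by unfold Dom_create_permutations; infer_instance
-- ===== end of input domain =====

-- B replaces A's recursion (which recomputes the suffix result for every element of the
-- current level) with one right-to-left fold building each level's result exactly once.


-- ===== PORT A =====
-- literal transliteration of A: len==1 returns l[0]; else nested loops, the recursive
-- call re-evaluated inside the outer loop body (as in Python). [] is excluded by Pre_.
def create_permutations : List (List String) → List String
  | [] => []                                   -- Python raises IndexError here (outside Pre_)
  | [x] => x
  | x :: xs =>
      x.foldl (fun perms a =>
        (create_permutations xs).foldl (fun p b => p ++ [a ++ b]) perms) []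

-- ===== PORT B =====
-- transliteration of Source B: acc = l[-1]; for level in reversed(l[:-1]): acc = [a+b ...]
def create_permutations_alt (l : List (List String)) : List String :=
  (l.dropLast.reverse).foldl
    (fun acc level => level.flatMap (fun a => acc.map (fun b => a ++ b)))
    (l.getLastD [])

-- ===== PRECONDITION & SPEC =====
-- Pre_ excludes only the empty list, on which both A and B raise IndexError.
def Pre_create_permutations (l : List (List String)) : Prop := l ≠ []
instance (l : List (List String)) : Decidable (Pre_create_permutations l) := by
  unfold Pre_create_permutations; infer_instance

def pvWitness_create_permutations : List (List String) := [["a", "b"], ["c"]]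

def Spec_create_permutations (l : List (List String)) (out : List String) : Prop := out = create_permutations_alt l
instance (l : List (List String)) (out : List String) : Decidable (Spec_create_permutations l out) := by unfold Spec_create_permutations; infer_instance

-- ===== CLAIM (what is proved, stated in full; the proofs are below) =====
def Claim_equal_create_permutations : Prop := ∀ (l : List (List String)), Dom_create_permutations l → Pre_create_permutations l → Spec_create_permutations l (create_permutations l)

-- ===== LEMMAS AND PROOFS =====

theorem inner_foldl (R : List String) (a : String) (p : List String) :
    R.foldl (fun p b => p ++ [a ++ b]) p = p ++ R.map (fun b => a ++ b) := by
  induction R generalizing p with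
  | nil => simp
  | cons r rs ih => simp [List.foldl, ih]

theorem outer_foldl (x : List String) (R acc : List String) :
    x.foldl (fun perms a => R.foldl (fun p b => p ++ [a ++ b]) perms) acc
      = acc ++ x.flatMap (fun a => R.map (fun b => a ++ b)) := by
  induction x generalizing acc with
  | nil => simp
  | cons c cs ih =>
    rw [List.foldl_cons, inner_foldl, ih]
    simp

theorem alt_cons (x y : List String) (ys : List (List String)) :
    create_permutations_alt (x :: y :: ys)
      = x.flatMap (fun a => (create_permutations_alt (y :: ys)).map (fun b => a ++ b)) := by
  unfold create_permutations_alt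
  simp [List.dropLast_cons₂, List.foldl_append]

theorem a_eq_b (l : List (List String)) (h : l ≠ []) :
    create_permutations l = create_permutations_alt l := by
  induction l with
  | nil => exact absurd rfl h
  | cons x xs ih =>
    cases xs with
    | nil => simp [create_permutations, create_permutations_alt]
    | cons y ys =>
      rw [show create_permutations (x :: y :: ys)
            = (x.foldl (fun perms a =>
                (create_permutations (y :: ys)).foldl (fun p b => p ++ [a ++ b]) perms) [])
          from rfl,
        outer_foldl, alt_cons x y ys, ih (by simp)]
      simp

-- ===== VERDICT (by name: the statement is the Claim_ definition above) =====
theorem create_permutations_spec : Claim_equal_create_permutations := by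
  intro l _ hpre
  exact a_eq_b l hpre
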